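-- pv_equiv track=rewrite | github.com/THEKINGSTAR/udacity_data_analysis_pro-nano-dgree | 2. Introduction to Python/Lesson 5 Functions/readable_timedelta.py | readable_timedelta
-- ===== SOURCE A (Python) =====
-- def readable_timedelta(input_days):
--     weeks = 0
--     days = 0
--     for i in range(input_days):
--         if input_days >= 7:
--             weeks += 1
--             input_days = input_days - 7
--         elif input_days < 7 and input_days > 0:
--             days += 1
--             input_days -= 1
--     return("{} week(s) and {} day(s).".format(weeks, days))
-- ===== SOURCE B (Python) =====
-- def readable_timedelta(input_days):
--     if input_days > 0:
--         weeks, days = divmod(input_days, 7)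
--     else:
--         weeks = days = 0
--     return "{} week(s) and {} day(s).".format(weeks, days)
-- ===== Notes on version B (the rewrite author's own statement) =====
-- stated objective: faster
-- what changed: Replaces A's per-iteration decrement loop over the original range with a single divmod closed form, guarded for non-positive input where A's range is empty.
import Mathlib
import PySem

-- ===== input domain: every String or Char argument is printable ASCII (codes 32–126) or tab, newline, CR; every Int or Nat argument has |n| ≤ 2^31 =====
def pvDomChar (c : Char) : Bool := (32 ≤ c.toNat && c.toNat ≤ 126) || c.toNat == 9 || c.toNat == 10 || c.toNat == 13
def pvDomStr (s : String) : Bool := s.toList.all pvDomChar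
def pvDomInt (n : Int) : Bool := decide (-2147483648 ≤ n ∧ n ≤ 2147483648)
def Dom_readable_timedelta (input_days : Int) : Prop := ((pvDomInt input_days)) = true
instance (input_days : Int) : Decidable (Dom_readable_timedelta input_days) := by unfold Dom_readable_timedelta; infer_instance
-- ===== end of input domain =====

-- B replaces A's O(n) decrement loop by the O(1) divmod closed form (guarded by input_days > 0).

-- ===== PORT A =====
-- loop body: state (weeks, days, input_days); the loop iterates over range(original input_days)
def readable_timedelta_step (st : Int × Int × Int) (_i : Int) : Int × Int × Int :=
  if st.2.2 ≥ 7 then (st.1 + 1, st.2.1, st.2.2 - 7)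
  else if st.2.2 < 7 ∧ st.2.2 > 0 then (st.1, st.2.1 + 1, st.2.2 - 1)
  else st

def readable_timedelta (input_days : Int) : String :=
  let st := (PySem.List.pyRange 0 input_days 1).foldl readable_timedelta_step (0, 0, input_days)
  PySem.Int.toStr st.1 ++ " week(s) and " ++ PySem.Int.toStr st.2.1 ++ " day(s)."

-- ===== PORT B =====
def readable_timedelta_alt (input_days : Int) : String :=
  let wd : Int × Int :=
    if input_days > 0 then (PySem.Int.floordiv input_days 7, PySem.Int.mod input_days 7)
    else (0, 0)
  PySem.Int.toStr wd.1 ++ " week(s) and " ++ PySem.Int.toStr wd.2 ++ " day(s)."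

-- ===== PRECONDITION & SPEC =====
def Spec_readable_timedelta (input_days : Int) (out : String) : Prop := out = readable_timedelta_alt input_days
instance (input_days : Int) (out : String) : Decidable (Spec_readable_timedelta input_days out) := by unfold Spec_readable_timedelta; infer_instance

-- ===== CLAIM (what is proved, stated in full; the proofs are below) =====
def Claim_equal_readable_timedelta : Prop := ∀ (input_days : Int), Dom_readable_timedelta input_days → Spec_readable_timedelta input_days (readable_timedelta input_days)

-- ===== LEMMAS AND PROOFS =====

-- the loop invariant: from state (w, d, m) with 0 ≤ m ≤ #iterations left, the loop ends at (w + m/7, d + m%7, 0)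
theorem readable_timedelta_loop (l : List Int) : ∀ (w d m : Int), 0 ≤ m → m ≤ l.length →
    l.foldl readable_timedelta_step (w, d, m) = (w + m / 7, d + m % 7, 0) := by
  induction l with
  | nil =>
    intro w d m h0 hl
    simp only [List.length_nil, Nat.cast_zero] at hl
    have hm : m = 0 := by omega
    subst hm; simp
  | cons a l ih =>
    intro w d m h0 hl
    simp only [List.length_cons] at hl
    simp only [List.foldl_cons, readable_timedelta_step]
    by_cases h7 : m ≥ 7
    · rw [if_pos h7, ih (w + 1) d (m - 7) (by omega) (by omega)]
      simp only [Prod.mk.injEq]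
      exact ⟨by omega, by omega, trivial⟩
    · rw [if_neg h7]
      by_cases hp : m > 0
      · rw [if_pos ⟨by omega, hp⟩, ih w (d + 1) (m - 1) (by omega) (by omega)]
        simp only [Prod.mk.injEq]
        exact ⟨by omega, by omega, trivial⟩
      · have hm : m = 0 := by omega
        subst hm
        rw [if_neg (by omega), ih w d 0 le_rfl (by omega)]

-- ===== VERDICT (by name: the statement is the Claim_ definition above) =====
theorem readable_timedelta_spec : Claim_equal_readable_timedelta := by
  intro n _
  unfold Spec_readable_timedelta readable_timedelta readable_timedelta_alt
  by_cases hp : n > 0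
  · have hlen : (n : Int) ≤ ((PySem.List.pyRange 0 n 1).length : Int) := by
      rw [PySem.List.length_pyRange_one]; omega
    rw [readable_timedelta_loop _ 0 0 n (by omega) hlen]
    rw [if_pos hp,
        PySem.Int.floordiv_eq_ediv_of_pos (a := n) (by norm_num),
        PySem.Int.mod_eq_emod_of_pos (a := n) (by norm_num)]
    simp
  · have hnil : PySem.List.pyRange 0 n 1 = [] := PySem.List.pyRange_one_eq_nil (by omega)
    rw [hnil, if_neg hp]
    simp
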